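-- pv_equiv track=rewrite | github.com/stepan-o/snapshotter | src/snapshotter/pass2_semantic.py | _looks_truncated
-- ===== SOURCE A (Python) =====
-- def _looks_truncated(text: str) -> bool:
--     s = (text or "").strip()
--     if not s:
--         return False
--     if not s.endswith("}"):
--         return True
--
--     in_str = False
--     esc = False
--     bal = 0
--     for ch in s:
--         if in_str:
--             if esc:
--                 esc = False
--             elif ch == "\\":
--                 esc = True
--             elif ch == '"':
--                 in_str = False
--             continue
--         if ch == '"':
--             in_str = True
--             continue
--         if ch == "{":
--             bal += 1
--         elif ch == "}":
--             bal -= 1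
--     return bal != 0
-- ===== SOURCE B (Python) =====
-- def _looks_truncated(text: str) -> bool:
--     s = (text or "").strip()
--     if not s:
--         return False
--     if not s.endswith("}"):
--         return True
--
--     # Build a "cleaned" copy of s with every string literal (incl. escaped
--     # chars; an unterminated string runs to the end) removed, then compare
--     # the two brace counts on the cleaned text.
--     out = []
--     i = 0
--     n = len(s)
--     while i < n:
--         ch = s[i]
--         if ch == '"':
--             i += 1
--             while i < n and s[i] != '"':
--                 i += 2 if s[i] == '\\' else 1
--             i += 1
--         else:
--             out.append(ch)
--             i += 1
--     cleaned = "".join(out)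
--     return cleaned.count("{") != cleaned.count("}")
-- ===== Notes on version B (the rewrite author's own statement) =====
-- stated objective: alternative
-- what changed: Replaces A's single fused scan with three boolean/integer state flags by a two-phase decomposition: first strip all JSON string literals (escapes and unterminated strings included) out of the text with an index-skipping scanner, then compare the counts of opening and closing braces in the cleaned text.
import Mathlib
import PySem

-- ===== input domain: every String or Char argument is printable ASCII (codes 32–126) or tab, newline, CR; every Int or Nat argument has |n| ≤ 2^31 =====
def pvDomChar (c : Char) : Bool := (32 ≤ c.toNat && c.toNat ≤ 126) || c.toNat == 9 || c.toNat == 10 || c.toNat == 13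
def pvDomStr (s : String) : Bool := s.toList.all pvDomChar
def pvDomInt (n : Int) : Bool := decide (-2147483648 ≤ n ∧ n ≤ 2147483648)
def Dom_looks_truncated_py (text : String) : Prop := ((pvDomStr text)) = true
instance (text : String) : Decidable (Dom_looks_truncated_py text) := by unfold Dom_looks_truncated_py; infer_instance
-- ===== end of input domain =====

-- B replaces A's fused three-flag state machine with a two-phase decomposition
-- (first strip string literals out of the text, then compare the two brace
-- counts); same cost, clearer structure (objective: alternative).

-- ===== PORT A =====
-- one step of A's for-loop over (in_str, esc, bal)
def pvStepA (st : Bool × Bool × Int) (ch : Char) : Bool × Bool × Int :=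
  if st.1 then
    if st.2.1 then (st.1, false, st.2.2)
    else if ch = '\\' then (st.1, true, st.2.2)
    else if ch = '"' then (false, st.2.1, st.2.2)
    else st
  else if ch = '"' then (true, st.2.1, st.2.2)
  else if ch = '{' then (st.1, st.2.1, st.2.2 + 1)
  else if ch = '}' then (st.1, st.2.1, st.2.2 - 1)
  else st

def looks_truncated_py (text : String) : Bool :=
  -- s = (text or "").strip()  ('text or ""' is text itself for strings)
  let s := PySem.Str.strip (if text = "" then "" else text)
  if s = "" then false
  else if PySem.Str.endswith s "}" = false then true
  else
    let r := s.toList.foldl pvStepA (false, false, 0)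
    decide (r.2.2 ≠ 0)

-- ===== PORT B =====
-- the outer while-loop of Source B: copy chars, diverting to pvSkipStr at a quote
mutual
def pvClean : List Char → List Char
  | [] => []
  | c :: r => if c = '"' then pvSkipStr r else c :: pvClean r
termination_by l => l.length
decreasing_by all_goals (simp; try omega)
-- the inner while-loop: consume a string literal ('\\' consumes two chars)
def pvSkipStr : List Char → List Char
  | [] => []
  | c :: r =>
      if c = '"' then pvClean r
      else if c = '\\' then pvSkipStr (r.drop 1)
      else pvSkipStr r
termination_by l => l.length
decreasing_by all_goals (simp; try omega)
end

def looks_truncated_py_alt (text : String) : Bool :=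
  let s := PySem.Str.strip (if text = "" then "" else text)
  if s = "" then false
  else if PySem.Str.endswith s "}" = false then true
  else
    -- cleaned = "".join(out); cleaned.count(c) of a single char is List.count
    let cleaned := pvClean s.toList
    decide (cleaned.count '{' ≠ cleaned.count '}')

-- ===== PRECONDITION & SPEC =====
def Spec_looks_truncated_py (text : String) (out : Bool) : Prop := out = looks_truncated_py_alt text
instance (text : String) (out : Bool) : Decidable (Spec_looks_truncated_py text out) := by unfold Spec_looks_truncated_py; infer_instance

-- ===== CLAIM (what is proved, stated in full; the proofs are below) =====
def Claim_equal_looks_truncated_py : Prop := ∀ (text : String), Dom_looks_truncated_py text → Spec_looks_truncated_py text (looks_truncated_py text)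

-- ===== LEMMAS AND PROOFS =====

-- A's loop from (in_str := false) computes the brace balance of pvClean l,
-- and from (in_str := true, esc := false) that of pvSkipStr l.
theorem pvKey (n : Nat) : ∀ l : List Char, l.length ≤ n → ∀ bal : Int,
    ((l.foldl pvStepA (false, false, bal)).2.2
        = bal + ((pvClean l).count '{' : Int) - ((pvClean l).count '}' : Int))
  ∧ ((l.foldl pvStepA (true, false, bal)).2.2
        = bal + ((pvSkipStr l).count '{' : Int) - ((pvSkipStr l).count '}' : Int)) := by
  induction n with
  | zero =>
    intro l hl bal
    have : l = [] := List.eq_nil_of_length_eq_zero (Nat.le_zero.mp hl)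
    subst this
    simp [pvClean, pvSkipStr]
  | succ n ih =>
    intro l hl bal
    cases l with
    | nil => simp [pvClean, pvSkipStr]
    | cons c r =>
      have hr : r.length ≤ n := by simpa using Nat.succ_le_succ_iff.mp hl
      constructor
      · -- state (false, false, bal)
        by_cases hq : c = '"'
        · subst hq
          simpa [List.foldl, pvStepA, pvClean] using (ih r hr bal).2
        · by_cases ho : c = '{'
          · subst ho
            have := (ih r hr (bal + 1)).1
            simp [List.foldl, pvStepA, pvClean, this]
            ring
          · by_cases hc : c = '}'
            · subst hc
              have := (ih r hr (bal - 1)).1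
              simp [List.foldl, pvStepA, pvClean, this]
              ring
            · have := (ih r hr bal).1
              simp [List.foldl, pvStepA, pvClean, hq, ho, hc, this]
      · -- state (true, false, bal)
        by_cases hq : c = '"'
        · subst hq
          simpa [List.foldl, pvStepA, pvSkipStr] using (ih r hr bal).1
        · by_cases hb : c = '\\'
          · subst hb
            -- escape: the next char (if any) is consumed in state esc = true
            cases r with
            | nil => simp [List.foldl, pvStepA, pvSkipStr]
            | cons c' r' =>
              have hr' : r'.length ≤ n := by
                simp at hr; omega
              have := (ih r' hr' bal).2
              simp [List.foldl, pvStepA, pvSkipStr, this]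
          · have := (ih r hr bal).2
            simp [List.foldl, pvStepA, pvSkipStr, hq, hb, this]

-- ===== VERDICT (by name: the statement is the Claim_ definition above) =====
theorem looks_truncated_py_spec : Claim_equal_looks_truncated_py := by
  intro text _
  unfold Spec_looks_truncated_py looks_truncated_py looks_truncated_py_alt
  set s := PySem.Str.strip (if text = "" then "" else text)
  by_cases h0 : s = ""
  · rw [if_pos h0, if_pos h0]
  · rw [if_neg h0, if_neg h0]
    by_cases h1 : PySem.Str.endswith s "}" = false
    · rw [if_pos h1, if_pos h1]
    · rw [if_neg h1, if_neg h1]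
      have hk := (pvKey s.toList.length s.toList le_rfl 0).1
      simp only [hk]
      exact decide_eq_decide.mpr (by omega)
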